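-- pv_equiv track=rewrite | github.com/sourcery-ai-bot/Eggbot | cogs/commands/fun.py | processLifeArgs
-- ===== SOURCE A (Python) =====
-- def processLifeArgs(args: tuple):
--     width = 0
--     height = 0
--     born = []
--     survive = []
--     for i in args:
--         try:
--             tempInt = int(i)
--             if not width:
--                 width = tempInt
--             elif not height:
--                 height = tempInt
--         except ValueError:
--             if i.lower()[0] == 'b':  # born argument
--                 for character in list(i[1:]):
--                     try:
--                         born.append(int(character))
--                     except ValueError:
--                         pass
--             elif i.lower()[0] == 's':  # survive argument
--                 for character in list(i[1:]):
--                     try: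
--                         survive.append(int(character))
--                     except ValueError:
--                         pass
--     if not width:
--         width = 10
--     if not height:
--         height = 10
--     return width, height, born, survive
-- ===== SOURCE B (Python) =====
-- def _try_int(s):
--     try:
--         return int(s)
--     except ValueError:
--         return None
--
--
-- def processLifeArgs(args: tuple):
--     dims = [n for n in map(_try_int, args) if n not in (None, 0)]
--     born = [d for i in args if _try_int(i) is None and i.lower()[0] == 'b'
--             for d in map(_try_int, i[1:]) if d is not None]
--     survive = [d for i in args if _try_int(i) is None and i.lower()[0] == 's'
--                for d in map(_try_int, i[1:]) if d is not None]
--     width = dims[0] if dims else 10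
--     height = dims[1] if len(dims) > 1 else 10
--     return width, height, born, survive
-- ===== Notes on version B (the rewrite author's own statement) =====
-- stated objective: alternative
-- what changed: Replaces A's single-pass if/elif state machine with three independent declarative passes (comprehensions) that collect the nonzero integers, the born digits and the survive digits, then takes width/height by indexing the collected list with a default of 10.
import Mathlib
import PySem

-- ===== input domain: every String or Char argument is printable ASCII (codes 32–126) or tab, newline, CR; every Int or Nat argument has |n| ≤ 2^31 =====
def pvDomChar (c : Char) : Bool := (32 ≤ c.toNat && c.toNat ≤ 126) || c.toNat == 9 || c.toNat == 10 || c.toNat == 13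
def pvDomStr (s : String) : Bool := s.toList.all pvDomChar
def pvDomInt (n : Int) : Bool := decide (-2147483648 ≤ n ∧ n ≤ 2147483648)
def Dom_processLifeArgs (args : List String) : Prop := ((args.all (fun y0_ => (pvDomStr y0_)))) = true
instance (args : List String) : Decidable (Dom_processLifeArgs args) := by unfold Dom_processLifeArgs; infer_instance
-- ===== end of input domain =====

-- B replaces A's single-pass if/elif state machine with three independent declarative
-- passes (nonzero ints, born digits, survive digits) plus indexing with default 10.

-- ===== PORT A =====
def processLifeArgs (args : List String) : Int × Int × List Int × List Int :=
  let st := args.foldl (fun (st : Int × Int × List Int × List Int) i =>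
    match st with
    | (width, height, born, survive) =>
      match PySem.Int.ofChars? i.toList with
      | some tempInt =>
          if width == 0 then (tempInt, height, born, survive)
          else if height == 0 then (width, tempInt, born, survive)
          else (width, height, born, survive)
      | none =>
          match PySem.List.pyGet? (PySem.Chars.lower i.toList) 0 with
          | none => (width, height, born, survive)   -- Python raises IndexError here (empty string); excluded by Pre_
          | some c =>
            if c == 'b' then
              (width, height,
               (PySem.List.slice i.toList (some 1) none).foldl (fun acc character =>
                  match PySem.Int.ofChars? [character] with
                  | some d => acc ++ [d]
                  | none => acc) born,
               survive)
            else if c == 's' then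
              (width, height, born,
               (PySem.List.slice i.toList (some 1) none).foldl (fun acc character =>
                  match PySem.Int.ofChars? [character] with
                  | some d => acc ++ [d]
                  | none => acc) survive)
            else (width, height, born, survive)) (0, 0, [], [])
  match st with
  | (width, height, born, survive) =>
    ((if width == 0 then 10 else width), (if height == 0 then 10 else height), born, survive)

-- ===== PORT B =====
-- helper _try_int of Source B (on a whole string)
def pvTryInt (s : String) : Option Int := PySem.Int.ofChars? s.toList

-- the three comprehensions of Source B, as named helpers
-- [n for n in map(_try_int, args) if n not in (None, 0)]
def pvDimsOf (args : List String) : List Int :=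
  (args.map pvTryInt).filterMap (fun o =>
    match o with
    | some v => if v ≠ 0 then some v else none
    | none => none)

-- the inner 'for d in map(_try_int, i[1:]) if d is not None'
def pvDigitsOf (cs : List Char) : List Int :=
  cs.filterMap (fun c => PySem.Int.ofChars? [c])

def pvBornOf (args : List String) : List Int :=
  args.flatMap (fun i =>
    if pvTryInt i = none ∧ PySem.List.pyGet? (PySem.Chars.lower i.toList) 0 = some 'b'
    then pvDigitsOf (PySem.List.slice i.toList (some 1) none) else [])

def pvSurvOf (args : List String) : List Int :=
  args.flatMap (fun i =>
    if pvTryInt i = none ∧ PySem.List.pyGet? (PySem.Chars.lower i.toList) 0 = some 's'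
    then pvDigitsOf (PySem.List.slice i.toList (some 1) none) else [])

def processLifeArgs_alt (args : List String) : Int × Int × List Int × List Int :=
  let dims := pvDimsOf args
  (dims.getD 0 10, dims.getD 1 10, pvBornOf args, pvSurvOf args)

-- ===== PRECONDITION & SPEC =====
-- Pre_ excludes argument lists containing the empty string: there int("") raises ValueError and
-- then i.lower()[0] raises IndexError in A (and likewise in B); A returns on everything else.
def Pre_processLifeArgs (args : List String) : Prop := ∀ s ∈ args, s ≠ ""
instance (args : List String) : Decidable (Pre_processLifeArgs args) := by unfold Pre_processLifeArgs; infer_instance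
def pvWitness_processLifeArgs : List String := ["20", "b36", "S23", "0", "7"]

def Spec_processLifeArgs (args : List String) (out : Int × Int × List Int × List Int) : Prop := out = processLifeArgs_alt args
instance (args : List String) (out : Int × Int × List Int × List Int) : Decidable (Spec_processLifeArgs args out) := by unfold Spec_processLifeArgs; infer_instance

-- ===== CLAIM (what is proved, stated in full; the proofs are below) =====
def Claim_equal_processLifeArgs : Prop := ∀ (args : List String), Dom_processLifeArgs args → Pre_processLifeArgs args → Spec_processLifeArgs args (processLifeArgs args)

-- ===== LEMMAS AND PROOFS =====

-- A's loop body, named for the proofs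
def pvStepA (st : Int × Int × List Int × List Int) (i : String) : Int × Int × List Int × List Int :=
  match st with
  | (width, height, born, survive) =>
    match PySem.Int.ofChars? i.toList with
    | some tempInt =>
        if width == 0 then (tempInt, height, born, survive)
        else if height == 0 then (width, tempInt, born, survive)
        else (width, height, born, survive)
    | none =>
        match PySem.List.pyGet? (PySem.Chars.lower i.toList) 0 with
        | none => (width, height, born, survive)
        | some c =>
          if c == 'b' then
            (width, height,
             (PySem.List.slice i.toList (some 1) none).foldl (fun acc character =>
                match PySem.Int.ofChars? [character] with
                | some d => acc ++ [d]
                | none => acc) born,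
             survive)
          else if c == 's' then
            (width, height, born,
             (PySem.List.slice i.toList (some 1) none).foldl (fun acc character =>
                match PySem.Int.ofChars? [character] with
                | some d => acc ++ [d]
                | none => acc) survive)
          else (width, height, born, survive)

theorem pvInner_eq (cs : List Char) (b : List Int) :
    cs.foldl (fun acc character =>
      match PySem.Int.ofChars? [character] with
      | some d => acc ++ [d]
      | none => acc) b = b ++ pvDigitsOf cs := by
  induction cs generalizing b with
  | nil => simp [pvDigitsOf]
  | cons c cs ih =>
    simp only [List.foldl_cons, pvDigitsOf, List.filterMap_cons]
    cases PySem.Int.ofChars? [c] <;> simp [ih, pvDigitsOf]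

-- the invariant relating A's state machine to the staged values of the processed prefix
def pvInv (sA : Int × Int × List Int × List Int) (dims b s : List Int) : Prop :=
  sA.1 = dims.getD 0 0 ∧ sA.2.1 = dims.getD 1 0 ∧ sA.2.2.1 = b ∧ sA.2.2.2 = s ∧
    ∀ x ∈ dims, x ≠ 0

theorem pvStep_inv (sA : Int × Int × List Int × List Int) (dims b s : List Int)
    (i : String) (h : pvInv sA dims b s) :
    pvInv (pvStepA sA i) (dims ++ pvDimsOf [i]) (b ++ pvBornOf [i]) (s ++ pvSurvOf [i]) := by
  obtain ⟨w, ht, bb, ss⟩ := sA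
  obtain ⟨hw, hh, hb, hs, hnz⟩ := h
  dsimp only at hw hh hb hs
  subst hw hh hb hs
  simp only [pvStepA, pvDimsOf, pvBornOf, pvSurvOf, pvTryInt, List.map_cons, List.map_nil,
    List.filterMap_cons, List.filterMap_nil, List.flatMap_cons, List.flatMap_nil, List.append_nil]
  obtain hint | ⟨n, hint⟩ := (PySem.Int.ofChars? i.toList).eq_none_or_eq_some
  case inr =>
    simp only [hint]
    by_cases hn : n = 0
    · subst hn
      rcases dims with _ | ⟨d, _ | ⟨e, es⟩⟩
      · simp [pvInv]
      · have hd := hnz d (by simp)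
        simp [pvInv, hd]
      · have hd := hnz d (by simp)
        have he := hnz e (by simp [List.mem_cons])
        simp [pvInv, hd, he]
        exact fun a ha => hnz a (by simp [ha])
    · rcases dims with _ | ⟨d, _ | ⟨e, es⟩⟩
      · simp [pvInv, hn]
      · have hd := hnz d (by simp)
        simp [pvInv, hn, hd]
      · have hd := hnz d (by simp)
        have he := hnz e (by simp [List.mem_cons])
        simp [pvInv, hn, hd, he]
        intro x hx
        rcases hx with h | rfl
        · exact hnz x (by simp [h])
        · exact hn
  case inl =>
    simp only [hint]
    obtain hget | ⟨c, hget⟩ := (PySem.List.pyGet? (PySem.Chars.lower i.toList) 0).eq_none_or_eq_some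
    case inl =>
      simp [pvInv, hget]
      exact fun x hx => hnz x hx
    case inr =>
      simp only [hget]
      by_cases hcb : c = 'b'
      · subst hcb
        simp [pvInv, pvInner_eq]
        exact fun x hx => hnz x hx
      · by_cases hcs : c = 's'
        · subst hcs
          simp [pvInv, pvInner_eq]
          exact fun x hx => hnz x hx
        · simp [pvInv, hcb, hcs]
          exact fun x hx => hnz x hx

theorem pvStaged_append (xs ys : List String) :
    pvDimsOf (xs ++ ys) = pvDimsOf xs ++ pvDimsOf ys ∧
    pvBornOf (xs ++ ys) = pvBornOf xs ++ pvBornOf ys ∧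
    pvSurvOf (xs ++ ys) = pvSurvOf xs ++ pvSurvOf ys := by
  simp [pvDimsOf, pvBornOf, pvSurvOf]

theorem pvFold_inv (args : List String) (sA : Int × Int × List Int × List Int)
    (dims b s : List Int) (h : pvInv sA dims b s) :
    pvInv (args.foldl pvStepA sA) (dims ++ pvDimsOf args) (b ++ pvBornOf args) (s ++ pvSurvOf args) := by
  induction args generalizing sA dims b s with
  | nil => simpa [pvDimsOf, pvBornOf, pvSurvOf] using h
  | cons a rest ih =>
    have h1 := ih (pvStepA sA a) _ _ _ (pvStep_inv sA dims b s a h)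
    have e1 : pvDimsOf (a :: rest) = pvDimsOf [a] ++ pvDimsOf rest := by
      simpa using (pvStaged_append [a] rest).1
    have e2 : pvBornOf (a :: rest) = pvBornOf [a] ++ pvBornOf rest := by
      simpa using (pvStaged_append [a] rest).2.1
    have e3 : pvSurvOf (a :: rest) = pvSurvOf [a] ++ pvSurvOf rest := by
      simpa using (pvStaged_append [a] rest).2.2
    rw [List.foldl_cons, e1, e2, e3, ← List.append_assoc, ← List.append_assoc, ← List.append_assoc]
    exact h1

-- ===== VERDICT (by name: the statement is the Claim_ definition above) =====
theorem processLifeArgs_spec : Claim_equal_processLifeArgs := by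
  intro args _ _
  unfold Spec_processLifeArgs processLifeArgs processLifeArgs_alt
  have h := pvFold_inv args (0, 0, [], []) [] [] [] (by simp [pvInv])
  simp only [List.nil_append] at h
  show _ = ((pvDimsOf args).getD 0 10, (pvDimsOf args).getD 1 10, pvBornOf args, pvSurvOf args)
  have eA : (fun (st : Int × Int × List Int × List Int) i =>
      match st with
      | (width, height, born, survive) =>
        match PySem.Int.ofChars? i.toList with
        | some tempInt =>
            if width == 0 then (tempInt, height, born, survive)
            else if height == 0 then (width, tempInt, born, survive)
            else (width, height, born, survive)
        | none =>
            match PySem.List.pyGet? (PySem.Chars.lower i.toList) 0 with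
            | none => (width, height, born, survive)
            | some c =>
              if c == 'b' then
                (width, height,
                 (PySem.List.slice i.toList (some 1) none).foldl (fun acc character =>
                    match PySem.Int.ofChars? [character] with
                    | some d => acc ++ [d]
                    | none => acc) born,
                 survive)
              else if c == 's' then
                (width, height, born,
                 (PySem.List.slice i.toList (some 1) none).foldl (fun acc character =>
                    match PySem.Int.ofChars? [character] with
                    | some d => acc ++ [d]
                    | none => acc) survive)
              else (width, height, born, survive)) = pvStepA := rfl
  rw [eA]
  generalize hF : args.foldl pvStepA (0, 0, [], []) = sA
  rw [hF] at h
  obtain ⟨w, ht, bb, ss⟩ := sA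
  obtain ⟨hw, hh, hb, hs, hnz⟩ := h
  subst hw hh hb hs
  rcases hd : pvDimsOf args with _ | ⟨d, _ | ⟨e, es⟩⟩
  · simp
  · have h1 := hnz d (by simp [hd])
    simp [h1]
  · have h1 := hnz d (by simp [hd])
    have h2 := hnz e (by simp [hd, List.mem_cons])
    simp [h1, h2]
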